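-- pv_equiv track=rewrite | github.com/Wulfic/AI-OS | src/aios/cli/hrm_hf/dataset_size_detection.py | is_epoch_complete
-- ===== SOURCE A (Python) =====
-- def is_epoch_complete(
--     blocks_processed: str,
--     total_blocks: int,
-- ) -> bool:
--     """Check if all blocks have been processed (epoch is complete).
--
--     Args:
--         blocks_processed: Comma-separated string of block indices (e.g., "0,3,7,1,5,2,4,6")
--         total_blocks: Total number of blocks in dataset
--
--     Returns:
--         True if all blocks have been visited, False otherwise
--     """
--     if total_blocks <= 0:
--         return False
--
--     if not blocks_processed or blocks_processed.strip() == "":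
--         return False
--
--     try:
--         # Parse block indices
--         processed_set = set(int(idx.strip()) for idx in blocks_processed.split(",") if idx.strip())
--
--         # Check if all blocks (0 to total_blocks-1) have been processed
--         required_blocks = set(range(total_blocks))
--
--         return required_blocks.issubset(processed_set)
--
--     except Exception:
--         return False
-- ===== SOURCE B (Python) =====
-- def is_epoch_complete(
--     blocks_processed: str,
--     total_blocks: int,
-- ) -> bool:
--     """Sort-then-scan: sort the parsed indices and sweep them once with a
--     'next expected block' counter; no set is built and no subset test is run.
--     Correct because after sorting, block k can only be matched after blocks
--     0..k-1 have been matched, so the counter reaches total_blocks exactly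
--     when every index 0..total_blocks-1 occurs somewhere in the input."""
--     if total_blocks <= 0:
--         return False
--     if not blocks_processed or blocks_processed.strip() == "":
--         return False
--     try:
--         indices = sorted(int(tok.strip()) for tok in blocks_processed.split(",") if tok.strip())
--     except Exception:
--         return False
--     expected = 0
--     for idx in indices:
--         if idx == expected:
--             expected += 1
--     return expected >= total_blocks
-- ===== Notes on version B (the rewrite author's own statement) =====
-- stated objective: alternative
-- what changed: Replaces the hash-set construction and set(range(n)).issubset test by sort-then-scan: the parsed indices are sorted and swept once with a single 'next expected block' counter, so completeness is decided by order rather than by membership and no set of required blocks is ever materialised.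
import Mathlib
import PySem

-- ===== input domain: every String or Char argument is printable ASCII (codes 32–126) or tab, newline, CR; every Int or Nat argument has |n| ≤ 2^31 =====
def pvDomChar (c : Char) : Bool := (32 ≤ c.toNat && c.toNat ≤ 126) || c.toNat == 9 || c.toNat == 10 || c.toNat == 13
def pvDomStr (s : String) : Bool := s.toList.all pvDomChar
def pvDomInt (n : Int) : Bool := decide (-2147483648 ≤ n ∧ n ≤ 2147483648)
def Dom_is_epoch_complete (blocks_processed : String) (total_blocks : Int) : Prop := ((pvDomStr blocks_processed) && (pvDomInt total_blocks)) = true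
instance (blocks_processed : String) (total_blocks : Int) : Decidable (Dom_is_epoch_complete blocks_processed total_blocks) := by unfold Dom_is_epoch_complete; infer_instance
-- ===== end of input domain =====

-- B replaces the set construction plus subset test by sort-then-scan: sort the parsed indices
-- and sweep them once with a 'next expected block' counter (alternative algorithm).

-- ===== PORT A =====
-- the try/except is modelled by the .all isSome guard: the generator raises (→ except → False) iff
-- some nonempty-after-strip token fails int()
def is_epoch_complete (blocks_processed : String) (total_blocks : Int) : Bool :=
  if total_blocks ≤ 0 then false
  else if blocks_processed = "" || PySem.Str.strip blocks_processed = "" then false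
  else
    let toks := (((PySem.Str.split? blocks_processed ",").getD [])).filter
      (fun x => PySem.Str.strip x != "")
    if toks.all (fun x => (PySem.Int.ofStr? (PySem.Str.strip x)).isSome) then
      let processed := PySem.Set.ofList
        (toks.map (fun x => (PySem.Int.ofStr? (PySem.Str.strip x)).getD 0))
      let required := PySem.Set.ofList (PySem.List.pyRange 0 total_blocks 1)
      PySem.Set.issubset required processed
    else false

-- ===== PORT B =====
-- the generator inside Source B's sorted(...): some (parsed ints, in token order) or none on ValueError
def altParse : List String → Option (List Int)
  | [] => some []
  | tok :: rest =>
    if PySem.Str.strip tok = "" then altParse rest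
    else
      match PySem.Int.ofStr? (PySem.Str.strip tok) with
      | none => none
      | some i => (altParse rest).map (i :: ·)

-- loop body of Source B: advance the 'next expected block' counter on a match
def altStep (expected idx : Int) : Int :=
  if idx == expected then expected + 1 else expected

def is_epoch_complete_alt (blocks_processed : String) (total_blocks : Int) : Bool :=
  if total_blocks ≤ 0 then false
  else if blocks_processed = "" || PySem.Str.strip blocks_processed = "" then false
  else
    match altParse ((PySem.Str.split? blocks_processed ",").getD []) with
    | none => false
    | some parsed =>
      let indices := PySem.List.sorted parsed (fun x => x) false
      let expected := indices.foldl altStep 0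
      decide (total_blocks ≤ expected)

-- ===== PRECONDITION & SPEC =====
def Spec_is_epoch_complete (blocks_processed : String) (total_blocks : Int) (out : Bool) : Prop := out = is_epoch_complete_alt blocks_processed total_blocks
instance (blocks_processed : String) (total_blocks : Int) (out : Bool) : Decidable (Spec_is_epoch_complete blocks_processed total_blocks out) := by unfold Spec_is_epoch_complete; infer_instance

-- ===== CLAIM (what is proved, stated in full; the proofs are below) =====
def Claim_equal_is_epoch_complete : Prop := ∀ (blocks_processed : String) (total_blocks : Int), Dom_is_epoch_complete blocks_processed total_blocks → Spec_is_epoch_complete blocks_processed total_blocks (is_epoch_complete blocks_processed total_blocks)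

-- ===== LEMMAS AND PROOFS =====

theorem altParse_eq (toks : List String) :
    altParse toks =
      if (toks.filter (fun x => PySem.Str.strip x != "")).all
          (fun x => (PySem.Int.ofStr? (PySem.Str.strip x)).isSome) then
        some ((toks.filter (fun x => PySem.Str.strip x != "")).map
          (fun x => (PySem.Int.ofStr? (PySem.Str.strip x)).getD 0))
      else none := by
  induction toks with
  | nil => simp [altParse]
  | cons tok rest ih =>
    by_cases hstrip : PySem.Str.strip tok = ""
    · simp [altParse, hstrip, ih]
    · cases hparse : PySem.Int.ofStr? (PySem.Str.strip tok) with
      | none => simp [altParse, hstrip, hparse]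
      | some i =>
        simp only [altParse, hstrip, hparse, List.filter_cons, ih,
          bne_iff_ne, ne_eq, not_false_eq_true, if_true, List.all_cons, List.map_cons,
          Option.isSome_some, Bool.true_and, Option.getD_some]
        split_ifs <;> simp_all

-- the counter never decreases
theorem le_scan (L : List Int) : ∀ e : Int, e ≤ L.foldl altStep e := by
  induction L with
  | nil => intro e; simp
  | cons i rest ih =>
    intro e
    have h := ih (altStep e i)
    have : e ≤ altStep e i := by unfold altStep; split_ifs <;> omega
    simp only [List.foldl_cons]; omega

-- every value strictly below the final counter (and at least the initial one) was scanned
theorem scan_mem (L : List Int) : ∀ e x : Int, e ≤ x → x < L.foldl altStep e → x ∈ L := by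
  induction L with
  | nil => intro e x h1 h2; simp at h2; omega
  | cons i rest ih =>
    intro e x h1 h2
    simp only [List.foldl_cons] at h2
    by_cases hie : i = e
    · subst hie
      have hstep : altStep i i = i + 1 := by unfold altStep; simp
      rw [hstep] at h2
      rcases eq_or_lt_of_le h1 with rfl | hlt
      · exact List.mem_cons_self
      · exact List.mem_cons_of_mem _ (ih (i + 1) x (by omega) h2)
    · have hstep : altStep e i = e := by unfold altStep; simp [hie]
      rw [hstep] at h2
      exact List.mem_cons_of_mem _ (ih e x h1 h2)

-- on a sorted list the counter passes every target t whose whole interval [e, t) is present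
theorem scan_ge (L : List Int) (hs : L.Pairwise (fun a b => a ≤ b)) :
    ∀ e t : Int, (∀ x : Int, e ≤ x → x < t → x ∈ L) → t ≤ L.foldl altStep e := by
  induction L with
  | nil =>
    intro e t h
    by_contra hc
    simp only [List.foldl_nil, not_le] at hc
    exact absurd (h e le_rfl hc) (List.not_mem_nil)
  | cons i rest ih =>
    intro e t h
    have hs' := (List.pairwise_cons.mp hs).2
    have hhead := (List.pairwise_cons.mp hs).1
    simp only [List.foldl_cons]
    by_cases hie : i = e
    · subst hie
      have hstep : altStep i i = i + 1 := by unfold altStep; simp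
      rw [hstep]
      refine ih hs' (i + 1) t (fun x hx1 hx2 => ?_)
      have := h x (by omega) hx2
      rcases List.mem_cons.mp this with rfl | hmem
      · omega
      · exact hmem
    · have hstep : altStep e i = e := by unfold altStep; simp [hie]
      rw [hstep]
      by_cases het : e < t
      · have he : e ∈ i :: rest := h e le_rfl het
        rcases List.mem_cons.mp he with rfl | hmem
        · exact absurd rfl hie
        · have hile : i ≤ e := hhead e hmem
          refine ih hs' e t (fun x hx1 hx2 => ?_)
          rcases List.mem_cons.mp (h x hx1 hx2) with rfl | hm
          · omega
          · exact hm
      · have := le_scan rest e; omega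

-- completeness of 0..t-1 in L equals the sorted scan reaching t
theorem final_eq (t : Int) (_ht : 0 < t) (L : List Int) :
    PySem.Set.issubset (PySem.Set.ofList (PySem.List.pyRange 0 t 1)) (PySem.Set.ofList L) =
      decide (t ≤ (PySem.List.sorted L (fun x => x) false).foldl altStep 0) := by
  set S := PySem.List.sorted L (fun x => x) false with hS
  have hperm : S.Perm L := PySem.List.sorted_perm L _ _
  have hsorted : S.Pairwise (fun a b => a ≤ b) := PySem.List.sorted_pairwise L _
  by_cases hall : ∀ x : Int, 0 ≤ x → x < t → x ∈ L
  · have hge : t ≤ S.foldl altStep 0 :=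
      scan_ge S hsorted 0 t (fun x hx1 hx2 => hperm.mem_iff.mpr (hall x hx1 hx2))
    rw [decide_eq_true hge]
    rw [PySem.Set.issubset_iff]
    intro x hx
    rw [PySem.Set.mem_ofList] at hx ⊢
    rw [PySem.List.mem_pyRange_one] at hx
    exact hall x hx.1 hx.2
  · simp only [not_forall] at hall
    obtain ⟨x, hx0, hxt, hxL⟩ := hall
    have hlt : S.foldl altStep 0 ≤ x :=
      le_of_not_gt fun hc => hxL (hperm.mem_iff.mp (scan_mem S 0 x hx0 hc))
    have : ¬ (t ≤ S.foldl altStep 0) := by omega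
    rw [decide_eq_false this]
    rw [← Bool.not_eq_true, PySem.Set.issubset_iff]
    intro hsub
    exact hxL (by
      have := hsub x (by rw [PySem.Set.mem_ofList, PySem.List.mem_pyRange_one]; exact ⟨hx0, hxt⟩)
      rwa [PySem.Set.mem_ofList] at this)

-- ===== VERDICT (by name: the statement is the Claim_ definition above) =====
theorem is_epoch_complete_spec : Claim_equal_is_epoch_complete := by
  intro s t _
  unfold Spec_is_epoch_complete is_epoch_complete is_epoch_complete_alt
  by_cases ht : t ≤ 0
  · simp [ht]
  · rw [if_neg ht, if_neg ht]
    by_cases hs : s = "" || PySem.Str.strip s = ""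
    · rw [if_pos hs, if_pos hs]
    · rw [if_neg hs, if_neg hs]
      dsimp only
      rw [altParse_eq]
      by_cases hall : (((PySem.Str.split? s ",").getD []).filter
            (fun x => PySem.Str.strip x != "")).all
          (fun x => (PySem.Int.ofStr? (PySem.Str.strip x)).isSome) = true
      · rw [if_pos hall, if_pos hall]
        exact final_eq t (by omega) _
      · rw [if_neg hall, if_neg hall]
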